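-- pv_equiv track=rewrite | github.com/Quantmetry/resources-intelligibility | useful_functions/postprocessing.py | _compute_dummy_dict
-- ===== SOURCE A (Python) =====
-- def _compute_dummy_dict(column_names, dummy_separator):
--     """Compute dummy dictionnary with categorical variables as keys and
--     lists of associated modalities as values.
--
--     Parameters
--     ----------
--     column_names : list,
--         Column names should be in format Variable + dummy_separator + Modality.
--
--     dummy_separator : str,
--         Separator used during dummification
--         (format: Variable + dummy_separator + Modality).
--
--     Returns
--     -------
--     dummy_dict : dict,
--         Dictionnary of categorical variables (dummy dictionnary).
--     """
--     dummy_dict = {}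
--     for var_split in [var.split(dummy_separator) for var in column_names]:
--         if (len(var_split))==2:
--             if var_split[0] in dummy_dict:
--                 dummy_dict[var_split[0]].append(var_split[1])
--             else:
--                 dummy_dict[var_split[0]] = [var_split[1]]
--     return dummy_dict
-- ===== SOURCE B (Python) =====
-- def _compute_dummy_dict(column_names, dummy_separator):
--     pairs = [(p[0], p[1])
--              for p in (c.split(dummy_separator) for c in column_names)
--              if len(p) == 2]
--     order = dict.fromkeys(v for v, _ in pairs)
--     return {v: [m for w, m in pairs if w == v] for v in order}
-- ===== Notes on version B (the rewrite author's own statement) =====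
-- stated objective: alternative
-- what changed: Replaces A's incremental dict mutation (contains-check then append-or-insert inside the loop) by a declarative pipeline: filter the splits to (var, modality) pairs once, deduplicate the variable prefixes with dict.fromkeys, then build the result with one comprehension per variable that scans the pair list.
import Mathlib
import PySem

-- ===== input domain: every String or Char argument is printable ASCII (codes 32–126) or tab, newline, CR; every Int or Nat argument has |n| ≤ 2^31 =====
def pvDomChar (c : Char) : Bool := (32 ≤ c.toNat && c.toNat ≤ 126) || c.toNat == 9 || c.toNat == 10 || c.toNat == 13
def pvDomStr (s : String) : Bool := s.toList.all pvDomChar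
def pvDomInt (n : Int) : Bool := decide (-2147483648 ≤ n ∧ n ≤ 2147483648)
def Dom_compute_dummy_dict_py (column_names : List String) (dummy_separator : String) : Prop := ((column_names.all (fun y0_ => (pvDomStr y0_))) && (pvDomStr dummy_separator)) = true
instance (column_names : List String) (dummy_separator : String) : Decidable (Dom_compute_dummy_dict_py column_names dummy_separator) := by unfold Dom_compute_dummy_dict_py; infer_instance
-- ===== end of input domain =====

-- B groups via an explicit pair list + dedup + per-key scan instead of A's dict mutation; alternative decomposition, same results.

-- ===== PORT A =====
-- A: loop over the split of every column; len == 2 → append to the existing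
-- key's list or insert a fresh singleton.  The dict is a PySem.Dict; the result
-- is its items (insertion order).  split? is none only for sep = "" (excluded by Pre_).
def compute_dummy_dict_py (column_names : List String) (dummy_separator : String) : List (String × List String) :=
  (column_names.map (fun var => (PySem.Str.split? var dummy_separator).getD [])
    |>.foldl (fun (d : PySem.Dict String (List String)) var_split =>
        match var_split with
        | [v, m] => if d.contains v then d.modify v [] (· ++ [m]) else d.insert v [m]
        | _ => d)
      PySem.Dict.empty).items

-- ===== PORT B =====
-- B: pairs = [(p[0], p[1]) for p in splits if len(p) == 2];
--    order = dict.fromkeys(first components)  (ported as PySem.Set.ofList);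
--    {v: [m for w, m in pairs if w == v] for v in order}.
def pvToPair (p : List String) : Option (String × String) :=
  match p with
  | [v, m] => some (v, m)
  | [] => none
  | [_] => none
  | _ :: _ :: _ :: _ => none

def pvPairsB (column_names : List String) (dummy_separator : String) : List (String × String) :=
  (column_names.map (fun c => (PySem.Str.split? c dummy_separator).getD [])).filterMap pvToPair

def compute_dummy_dict_py_alt (column_names : List String) (dummy_separator : String) : List (String × List String) :=
  let pairs := pvPairsB column_names dummy_separator
  let order : PySem.Set String := PySem.Set.ofList (pairs.map (·.1))
  order.map (fun v => (v, (pairs.filter (fun q => q.1 == v)).map (·.2)))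

-- ===== PRECONDITION & SPEC =====
-- Pre_ excludes only the inputs where Python's str.split("") raises ValueError:
-- an empty separator with a non-empty column list (both A and B raise there).
def Pre_compute_dummy_dict_py (column_names : List String) (dummy_separator : String) : Prop :=
  dummy_separator ≠ "" ∨ column_names = []
instance (column_names : List String) (dummy_separator : String) : Decidable (Pre_compute_dummy_dict_py column_names dummy_separator) := by unfold Pre_compute_dummy_dict_py; infer_instance

def pvWitness_compute_dummy_dict_py : List String × String := (["a_x", "a_y", "b_z", "c", "a_x_w"], "_")

def Spec_compute_dummy_dict_py (column_names : List String) (dummy_separator : String) (out : List (String × List String)) : Prop := out = compute_dummy_dict_py_alt column_names dummy_separator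
instance (column_names : List String) (dummy_separator : String) (out : List (String × List String)) : Decidable (Spec_compute_dummy_dict_py column_names dummy_separator out) := by unfold Spec_compute_dummy_dict_py; infer_instance

-- ===== CLAIM (what is proved, stated in full; the proofs are below) =====
def Claim_equal_compute_dummy_dict_py : Prop := ∀ (column_names : List String) (dummy_separator : String), Dom_compute_dummy_dict_py column_names dummy_separator → Pre_compute_dummy_dict_py column_names dummy_separator → Spec_compute_dummy_dict_py column_names dummy_separator (compute_dummy_dict_py column_names dummy_separator)

-- ===== LEMMAS AND PROOFS =====

-- A's branch on contains is exactly Dict.modify (insert keeps position / appends fresh).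
theorem pvStepA_eq_modify (d : PySem.Dict String (List String)) (p : List String) :
    (match p with
      | [v, m] => if d.contains v then d.modify v [] (· ++ [m]) else d.insert v [m]
      | _ => d)
    = (match p with
      | [v, m] => d.modify v [] (· ++ [m])
      | _ => d) := by
  match p with
  | [] => rfl
  | [_] => rfl
  | v :: m :: _ :: _ => rfl
  | [v, m] =>
    simp only
    by_cases h : d.contains v
    · simp [h]
    · simp [h, PySem.Dict.modify, PySem.Dict.getD_of_not_contains, Bool.not_eq_true _ |>.mp h]

-- folding A's match-step over the raw splits = folding the pair step over the filterMap'd pairs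
theorem pvFold_filterMap (l : List (List String)) (d : PySem.Dict String (List String)) :
    l.foldl (fun d p =>
        match p with
        | [v, m] => d.modify v [] (· ++ [m])
        | _ => d) d
    = (l.filterMap pvToPair).foldl (fun d q => d.modify q.1 [] (· ++ [q.2])) d := by
  induction l generalizing d with
  | nil => rfl
  | cons p rest ih =>
    match p with
    | [] => simpa [List.filterMap_cons, pvToPair] using ih d
    | [_] => simpa [List.filterMap_cons, pvToPair] using ih d
    | [v, m] => simpa [List.filterMap_cons, pvToPair] using ih (d.modify v [] (· ++ [m]))
    | _ :: _ :: _ :: _ => simpa [List.filterMap_cons, pvToPair] using ih d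

-- the grouping fold over a pair list, characterised
theorem pvGroup_items (ps : List (String × String)) :
    (ps.foldl (fun (d : PySem.Dict String (List String)) q => d.modify q.1 [] (· ++ [q.2]))
      PySem.Dict.empty).items
    = (PySem.Set.ofList (ps.map (·.1))).map
        (fun v => (v, (ps.filter (fun q => q.1 == v)).map (·.2))) := by
  have hnodup : ((ps.foldl (fun (d : PySem.Dict String (List String)) q =>
      d.modify q.1 [] (· ++ [q.2])) PySem.Dict.empty).keys).Nodup :=
    PySem.Dict.nodup_keys_foldl_modify_key ps (·.1) [] (fun _ q old => old ++ [q.2]) _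
      (by simp [PySem.Dict.keys_empty])
  rw [PySem.Dict.items_eq_map_keys _ hnodup []]
  rw [PySem.Dict.keys_foldl_modify_key ps (·.1) [] (fun _ q old => old ++ [q.2])]
  have hkeys : PySem.Set.update (PySem.Dict.empty : PySem.Dict String (List String)).keys
      (ps.map (·.1)) = PySem.Set.ofList (ps.map (·.1)) := by
    simp [PySem.Set.update, PySem.Set.ofList, PySem.Dict.keys_empty]
  rw [hkeys]
  refine List.map_congr_left ?_
  intro v _
  rw [PySem.Dict.getD_foldl_modify_append]
  simp [PySem.Dict.getD_empty]

-- ===== VERDICT (by name: the statement is the Claim_ definition above) =====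
theorem compute_dummy_dict_py_spec : Claim_equal_compute_dummy_dict_py := by
  intro column_names dummy_separator _ _
  unfold Spec_compute_dummy_dict_py compute_dummy_dict_py compute_dummy_dict_py_alt
  have hstep : (fun (d : PySem.Dict String (List String)) (p : List String) =>
      match p with
      | [v, m] => if d.contains v then d.modify v [] (· ++ [m]) else d.insert v [m]
      | _ => d)
    = (fun d p =>
      match p with
      | [v, m] => d.modify v [] (· ++ [m])
      | _ => d) := by
    funext d p; exact pvStepA_eq_modify d p
  rw [hstep, pvFold_filterMap]
  exact pvGroup_items (pvPairsB column_names dummy_separator)
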